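-- pv_equiv track=rewrite | github.com/rapidsai/velox-testing | scripts/nightly_status/search_upstream_issues.py | _split_code_blocks
-- ===== SOURCE A (Python) =====
-- def _split_code_blocks(section: str) -> list[str]:
--     """Split a section into alternating text and code-fenced fragments."""
--     fragments: list[str] = []
--     current: list[str] = []
--     in_code = False
--     for line in section.splitlines(keepends=True):
--         stripped = line.strip()
--         if stripped.startswith("```"):
--             if in_code:
--                 current.append(line)
--                 fragments.append("".join(current).strip())
--                 current = []
--                 in_code = False
--             else:
--                 text_before = "".join(current).strip()
--                 if text_before:
--                     fragments.append(text_before)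
--                 current = [line]
--                 in_code = True
--         else:
--             current.append(line)
--     trailing = "".join(current).strip()
--     if trailing:
--         if in_code:
--             trailing += "\n```"
--         fragments.append(trailing)
--     return [f for f in fragments if f]
-- ===== SOURCE B (Python) =====
-- def _split_code_blocks(section: str) -> list[str]:
--     """Split a section into alternating text and code-fenced fragments."""
--     lines = section.splitlines(keepends=True)
--     n = len(lines)
--
--     def is_fence(l: str) -> bool:
--         return l.strip().startswith("```")
--
--     frags: list[str] = []
--     k = 0
--     while True:
--         i = k
--         while i < n and not is_fence(lines[i]):
--             i += 1
--         text = "".join(lines[k:i]).strip()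
--         if text:
--             frags.append(text)
--         if i == n:
--             return frags
--         j = i + 1
--         while j < n and not is_fence(lines[j]):
--             j += 1
--         if j == n:
--             frags.append("".join(lines[i:]).strip() + "\n```")
--             return frags
--         frags.append("".join(lines[i:j + 1]).strip())
--         k = j + 1
-- ===== Notes on version B (the rewrite author's own statement) =====
-- stated objective: alternative
-- what changed: Replaces A's single stateful accumulator loop (current buffer + in_code flag) with a boundary-scanning walk that repeatedly slices the line list at the next opening and closing fence and emits each text/code fragment directly.
import Mathlib
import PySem

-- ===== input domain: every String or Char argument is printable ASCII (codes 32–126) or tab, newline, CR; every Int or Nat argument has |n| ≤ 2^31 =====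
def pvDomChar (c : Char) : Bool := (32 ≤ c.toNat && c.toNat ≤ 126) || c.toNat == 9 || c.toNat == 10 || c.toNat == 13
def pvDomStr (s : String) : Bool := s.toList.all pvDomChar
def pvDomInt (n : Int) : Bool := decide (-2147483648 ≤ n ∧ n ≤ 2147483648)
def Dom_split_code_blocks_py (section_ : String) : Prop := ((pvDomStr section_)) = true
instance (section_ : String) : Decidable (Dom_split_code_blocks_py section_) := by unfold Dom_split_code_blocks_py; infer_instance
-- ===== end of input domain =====

-- B replaces A's stateful accumulator loop (current buffer + in_code flag) with a
-- boundary-scanning recursion that slices the line list at successive fence lines;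
-- objective: alternative decomposition (same O(n) cost).


-- ===== PORT A =====
-- shared helper: section.splitlines(keepends=True); exact on the domain's line
-- breaks '\n', '\r', '\r\n' (PySem.Str.splitlines has no keepends form)
def pvSlk (acc : List Char) : List Char → List (List Char)
  | [] => if acc = [] then [] else [acc]
  | '\r' :: '\n' :: rest => (acc ++ ['\r', '\n']) :: pvSlk [] rest
  | '\r' :: rest => (acc ++ ['\r']) :: pvSlk [] rest
  | '\n' :: rest => (acc ++ ['\n']) :: pvSlk [] rest
  | c :: rest => pvSlk (acc ++ [c]) rest

-- the loop body of A: state (fragments, current, in_code)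
def pvStepA (st : List (List Char) × List (List Char) × Bool) (line : List Char) :
    List (List Char) × List (List Char) × Bool :=
  if PySem.Chars.startswith (PySem.Chars.strip line) ['`', '`', '`'] then
    if st.2.2 then
      (st.1 ++ [PySem.Chars.strip (st.2.1 ++ [line]).flatten], [], false)
    else
      let textBefore := PySem.Chars.strip st.2.1.flatten
      (if textBefore ≠ [] then st.1 ++ [textBefore] else st.1, [line], true)
  else
    (st.1, st.2.1 ++ [line], st.2.2)

-- A's code after the loop: the trailing fragment
def pvFinishA (st : List (List Char) × List (List Char) × Bool) : List (List Char) :=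
  let trailing := PySem.Chars.strip st.2.1.flatten
  if trailing ≠ [] then
    st.1 ++ [if st.2.2 then trailing ++ ['\n', '`', '`', '`'] else trailing]
  else st.1

def split_code_blocks_py (section_ : String) : List String :=
  let st := (pvSlk [] section_.toList).foldl pvStepA ([], [], false)
  ((pvFinishA st).filter (fun f => !f.isEmpty)).map (fun f => String.mk f)

-- ===== PORT B =====
def pvIsFence (l : List Char) : Bool :=
  PySem.Chars.startswith (PySem.Chars.strip l) ['`', '`', '`']

-- B's boundary walk: scan to the next opening fence, emit the text before it,
-- scan to the matching closing fence, emit the code fragment, recurse after it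
def pvGoB (lines : List (List Char)) : List (List Char) :=
  let p := fun l => !pvIsFence l
  let t := PySem.Chars.strip (lines.takeWhile p).flatten
  let txt : List (List Char) := if t = [] then [] else [t]
  match _hr : lines.dropWhile p with
  | [] => txt
  | f :: rest' =>
    match _hr2 : rest'.dropWhile p with
    | [] => txt ++ [PySem.Chars.strip (f :: rest').flatten ++ ['\n', '`', '`', '`']]
    | g :: rest3 =>
      txt ++ [PySem.Chars.strip ((f :: rest'.takeWhile p) ++ [g]).flatten] ++ pvGoB rest3
termination_by lines.length
decreasing_by
  have h1 : (lines.dropWhile p).length ≤ lines.length := List.length_dropWhile_le p lines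
  have h2 : (rest'.dropWhile p).length ≤ rest'.length := List.length_dropWhile_le p rest'
  rw [_hr] at h1; rw [_hr2] at h2; simp at h1 h2; omega

def split_code_blocks_py_alt (section_ : String) : List String :=
  (pvGoB (pvSlk [] section_.toList)).map (fun f => String.mk f)

-- ===== PRECONDITION & SPEC =====
def Spec_split_code_blocks_py (section_ : String) (out : List String) : Prop := out = split_code_blocks_py_alt section_
instance (section_ : String) (out : List String) : Decidable (Spec_split_code_blocks_py section_ out) := by unfold Spec_split_code_blocks_py; infer_instance

-- ===== CLAIM (what is proved, stated in full; the proofs are below) =====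
def Claim_equal_split_code_blocks_py : Prop := ∀ (section_ : String), Dom_split_code_blocks_py section_ → Spec_split_code_blocks_py section_ (split_code_blocks_py section_)

-- ===== LEMMAS AND PROOFS =====

-- a string with a non-space character strips to a nonempty string
theorem pv_strip_ne_nil {cs : List Char} {c : Char} (hc : c ∈ cs)
    (hs : PySem.Chars.isspace c = false) : PySem.Chars.strip cs ≠ [] := by
  intro h
  unfold PySem.Chars.strip PySem.Chars.rstrip PySem.Chars.lstrip at h
  rw [List.reverse_eq_nil_iff, List.dropWhile_eq_nil_iff] at h
  have hall : ∀ x ∈ cs.dropWhile PySem.Chars.isspace, PySem.Chars.isspace x = true := by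
    intro x hx
    exact h x (by simpa using hx)
  have hsplit := List.takeWhile_append_dropWhile (p := PySem.Chars.isspace) (l := cs)
  rw [← hsplit] at hc
  rcases List.mem_append.mp hc with h1 | h1
  · exact absurd (List.mem_takeWhile_imp h1) (by simp [hs])
  · exact absurd (hall c h1) (by simp [hs])

-- a fence line contains a backtick
theorem pv_fence_mem_backtick {l : List Char} (h : pvIsFence l = true) : '`' ∈ l := by
  unfold pvIsFence at h
  rw [PySem.Chars.startswith_iff] at h
  have h1 : '`' ∈ PySem.Chars.strip l := h.mem (by simp)
  have h2 : List.Sublist (PySem.Chars.strip l) l := by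
    unfold PySem.Chars.strip PySem.Chars.rstrip PySem.Chars.lstrip
    have s1 := (List.dropWhile_sublist (p := PySem.Chars.isspace)
      (l := (l.dropWhile PySem.Chars.isspace).reverse)).reverse
    simp only [List.reverse_reverse] at s1
    exact s1.trans (List.dropWhile_sublist _)
  exact h2.mem h1

-- any line list containing a fence line flattens+strips to nonempty
theorem pv_fence_flatten_ne_nil {ls : List (List Char)} {f : List Char}
    (hf : f ∈ ls) (h : pvIsFence f = true) :
    PySem.Chars.strip ls.flatten ≠ [] := by
  have hb : '`' ∈ ls.flatten := List.mem_flatten.mpr ⟨f, hf, pv_fence_mem_backtick h⟩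
  exact pv_strip_ne_nil hb (by decide)

-- non-fence lines are absorbed into `current` by A's loop
theorem pv_foldl_nonfence (ys : List (List Char)) (fr cur : List (List Char)) (b : Bool)
    (h : ∀ l ∈ ys, pvIsFence l = false) :
    List.foldl pvStepA (fr, cur, b) ys = (fr, cur ++ ys, b) := by
  induction ys generalizing cur with
  | nil => simp
  | cons y ys ih =>
    have hy : pvIsFence y = false := h y (by simp)
    unfold pvIsFence at hy
    rw [List.foldl_cons]
    have hstep : pvStepA (fr, cur, b) y = (fr, cur ++ [y], b) := by
      unfold pvStepA; simp [hy]
    rw [hstep, ih _ (fun l hl => h l (by simp [hl]))]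
    simp

theorem pv_dropWhile_cons_head {α : Type} {p : α → Bool} {l : List α} {x : α} {xs : List α}
    (h : l.dropWhile p = x :: xs) : p x = false := by
  induction l with
  | nil => simp at h
  | cons a l ih =>
    rw [List.dropWhile_cons] at h
    by_cases ha : p a
    · rw [if_pos ha] at h; exact ih h
    · rw [if_neg ha] at h; cases h; simpa using ha

theorem pv_tw_append {α : Type} (p : α → Bool) (xs ys : List α)
    (h : ∀ x ∈ xs, p x = true) : (xs ++ ys).takeWhile p = xs ++ ys.takeWhile p := by
  induction xs with
  | nil => simp
  | cons a l ih =>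
    have := h a (by simp)
    simp [this, ih (fun x hx => h x (by simp [hx]))]

theorem pv_dw_append {α : Type} (p : α → Bool) (xs ys : List α)
    (h : ∀ x ∈ xs, p x = true) : (xs ++ ys).dropWhile p = ys.dropWhile p := by
  induction xs with
  | nil => simp
  | cons a l ih =>
    have := h a (by simp)
    simp [this, ih (fun x hx => h x (by simp [hx]))]

theorem pv_step_open (fr cur : List (List Char)) (f : List Char) (hf : pvIsFence f = true) :
    pvStepA (fr, cur, false) f =
      ((if PySem.Chars.strip cur.flatten ≠ [] then fr ++ [PySem.Chars.strip cur.flatten] else fr),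
        [f], true) := by
  unfold pvIsFence at hf
  unfold pvStepA
  simp [hf]

theorem pv_step_close (fr cur : List (List Char)) (g : List Char) (hg : pvIsFence g = true) :
    pvStepA (fr, cur, true) g = (fr ++ [PySem.Chars.strip (cur ++ [g]).flatten], [], false) := by
  unfold pvIsFence at hg
  unfold pvStepA
  simp [hg]

-- main invariant: A's loop from a text-accumulating state equals B's walk
theorem pv_main (n : Nat) (lines : List (List Char)) (hn : lines.length ≤ n)
    (fr cur : List (List Char)) (hcur : ∀ l ∈ cur, pvIsFence l = false) :
    pvFinishA (List.foldl pvStepA (fr, cur, false) lines) = fr ++ pvGoB (cur ++ lines) := by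
  have hp_cur : ∀ l ∈ cur, (fun l => !pvIsFence l) l = true := by
    intro l hl; simp [hcur l hl]
  have dwcl : (cur ++ lines).dropWhile (fun l => !pvIsFence l)
      = lines.dropWhile (fun l => !pvIsFence l) := pv_dw_append _ _ _ hp_cur
  have twcl : (cur ++ lines).takeWhile (fun l => !pvIsFence l)
      = cur ++ lines.takeWhile (fun l => !pvIsFence l) := pv_tw_append _ _ _ hp_cur
  induction n generalizing lines fr cur with
  | zero =>
    have hl : lines = [] := List.length_eq_zero_iff.mp (Nat.le_zero.mp hn)
    subst hl
    simp only [List.foldl_nil]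
    rw [pvGoB]
    split
    next heq =>
      unfold pvFinishA
      have htw : (cur ++ []).takeWhile (fun l => !pvIsFence l) = cur := by
        simp [List.takeWhile_eq_self_iff.mpr hp_cur]
      rw [htw]
      by_cases h0 : PySem.Chars.strip cur.flatten = [] <;> simp [h0]
    next heq =>
      rw [dwcl] at heq; simp at heq
  | succ n ih =>
    cases hrest : lines.dropWhile (fun l => !pvIsFence l) with
    | nil =>
      have hall : ∀ l ∈ lines, pvIsFence l = false := by
        intro l hl
        have := List.dropWhile_eq_nil_iff.mp hrest l hl
        simpa using this
      rw [pv_foldl_nonfence _ _ _ _ hall]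
      rw [pvGoB]
      split
      next heq =>
        unfold pvFinishA
        have htw : (cur ++ lines).takeWhile (fun l => !pvIsFence l) = cur ++ lines := by
          rw [twcl]
          have : lines.takeWhile (fun l => !pvIsFence l) = lines := by
            apply List.takeWhile_eq_self_iff.mpr
            intro l hl; simp [hall l hl]
          rw [this]
        rw [htw]
        simp only [List.flatten_append]
        split <;> rename_i h0 <;> simp [h0]
      next heq =>
        rw [dwcl, hrest] at heq; simp at heq
    | cons f rest' =>
      have hpf : pvIsFence f = true := by simpa using pv_dropWhile_cons_head hrest
      have hsplit : lines.takeWhile (fun l => !pvIsFence l) ++ f :: rest' = lines := by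
        rw [← hrest]; exact List.takeWhile_append_dropWhile
      have hpre : ∀ l ∈ lines.takeWhile (fun l => !pvIsFence l), pvIsFence l = false := by
        intro l hl
        have := List.mem_takeWhile_imp hl; simpa using this
      have hlhs : List.foldl pvStepA (fr, cur, false) lines
          = List.foldl pvStepA
              (pvStepA (fr, cur ++ lines.takeWhile (fun l => !pvIsFence l), false) f) rest' := by
        conv_lhs => rw [← hsplit]
        rw [List.foldl_append, pv_foldl_nonfence _ _ _ _ hpre, List.foldl_cons]
      set t := PySem.Chars.strip (cur ++ lines.takeWhile (fun l => !pvIsFence l)).flatten with ht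
      have hopen := pv_step_open fr (cur ++ lines.takeWhile (fun l => !pvIsFence l)) f hpf
      rw [← ht] at hopen
      set fr' := if t ≠ [] then fr ++ [t] else fr with hfr'
      have hfrtxt : fr' = fr ++ (if t = [] then [] else [t]) := by
        by_cases h0 : t = [] <;> simp [hfr', h0]
      cases hrest2 : rest'.dropWhile (fun l => !pvIsFence l) with
      | nil =>
        have hall2 : ∀ l ∈ rest', pvIsFence l = false := by
          intro l hl
          have := List.dropWhile_eq_nil_iff.mp hrest2 l hl
          simpa using this
        have hne : PySem.Chars.strip (f ++ rest'.flatten) ≠ [] := by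
          have := pv_fence_flatten_ne_nil (ls := f :: rest') (f := f) (by simp) hpf
          simpa using this
        have hfin : pvFinishA (fr', [f] ++ rest', true)
            = fr' ++ [PySem.Chars.strip ((f :: rest').flatten) ++ ['\n', '`', '`', '`']] := by
          unfold pvFinishA; simp [hne]
        rw [hlhs, hopen, pv_foldl_nonfence _ _ _ _ hall2, hfin]
        conv_rhs => rw [pvGoB]
        split
        next heq => rw [dwcl, hrest] at heq; simp at heq
        next f0 rest0 heq =>
          rw [dwcl, hrest] at heq
          cases heq
          split
          next heq2 =>
            rw [hfrtxt, twcl, ← ht]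
            simp
          next heq2 => rw [hrest2] at heq2; simp at heq2
      | cons g rest3 =>
        have hpg : pvIsFence g = true := by simpa using pv_dropWhile_cons_head hrest2
        have hsplit2 : rest'.takeWhile (fun l => !pvIsFence l) ++ g :: rest3 = rest' := by
          rw [← hrest2]; exact List.takeWhile_append_dropWhile
        have hcode : ∀ l ∈ rest'.takeWhile (fun l => !pvIsFence l), pvIsFence l = false := by
          intro l hl
          have := List.mem_takeWhile_imp hl; simpa using this
        have hlen : rest3.length ≤ n := by
          have h1 := List.length_dropWhile_le (fun l => !pvIsFence l) lines
          have h2 := List.length_dropWhile_le (fun l => !pvIsFence l) rest'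
          rw [hrest] at h1; rw [hrest2] at h2; simp at h1 h2; omega
        have hclose := pv_step_close fr' ([f] ++ rest'.takeWhile (fun l => !pvIsFence l)) g hpg
        have hrec := ih rest3 hlen (fr' ++ [PySem.Chars.strip
            (([f] ++ rest'.takeWhile (fun l => !pvIsFence l)) ++ [g]).flatten]) []
          (by intro l hl; simp at hl) (by intro l hl; simp at hl) (by simp) (by simp)
        have hlhs2 : List.foldl pvStepA (fr', [f], true) rest'
            = List.foldl pvStepA
                ((fr' ++ [PySem.Chars.strip
                  (([f] ++ rest'.takeWhile (fun l => !pvIsFence l)) ++ [g]).flatten], [], false))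
                rest3 := by
          conv_lhs => rw [← hsplit2]
          rw [List.foldl_append, pv_foldl_nonfence _ _ _ _ hcode, List.foldl_cons, hclose]
        rw [hlhs, hopen, hlhs2, hrec]
        conv_rhs => rw [pvGoB]
        split
        next heq => rw [dwcl, hrest] at heq; simp at heq
        next f0 rest0 heq =>
          rw [dwcl, hrest] at heq
          cases heq
          split
          next heq2 => rw [hrest2] at heq2; simp at heq2
          next g0 rest30 heq2 =>
            rw [hrest2] at heq2
            cases heq2
            rw [hfrtxt, twcl, ← ht]
            simp

-- every fragment B emits is nonempty
theorem pv_goB_ne_nil (n : Nat) (lines : List (List Char)) (hn : lines.length ≤ n) :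
    ∀ x ∈ pvGoB lines, x ≠ [] := by
  induction n generalizing lines with
  | zero =>
    have hl : lines = [] := List.length_eq_zero_iff.mp (Nat.le_zero.mp hn)
    subst hl
    rw [pvGoB]
    split
    · split <;> simp_all
    · simp_all
  | succ n ih =>
    rw [pvGoB]
    split
    next heq =>
      split <;> simp_all
    next f rest' heq =>
      have hpf : pvIsFence f = true := by simpa using pv_dropWhile_cons_head heq
      split
      next heq2 =>
        intro x hx
        simp only [List.mem_append] at hx
        rcases hx with hx | hx
        · split at hx <;> simp_all
        · simp at hx; subst hx; simp
      next g rest3 heq2 =>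
        intro x hx
        simp only [List.mem_append, List.mem_singleton] at hx
        rcases hx with (hx | hx) | hx
        · split at hx <;> simp_all
        · subst hx
          exact pv_fence_flatten_ne_nil (f := f) (by simp) hpf
        · refine ih rest3 ?_ x hx
          have h1 := List.length_dropWhile_le (fun l => !pvIsFence l) lines
          have h2 := List.length_dropWhile_le (fun l => !pvIsFence l) rest'
          rw [heq] at h1; rw [heq2] at h2; simp at h1 h2; omega

-- ===== VERDICT (by name: the statement is the Claim_ definition above) =====
theorem split_code_blocks_py_spec : Claim_equal_split_code_blocks_py := by
  intro section_ _
  show split_code_blocks_py section_ = split_code_blocks_py_alt section_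
  simp only [split_code_blocks_py, split_code_blocks_py_alt]
  have hm := pv_main (pvSlk [] section_.toList).length (pvSlk [] section_.toList) le_rfl [] []
    (by intro l h; simp at h)
  simp only [List.nil_append] at hm
  rw [hm]
  have hne := pv_goB_ne_nil (pvSlk [] section_.toList).length (pvSlk [] section_.toList) le_rfl
  rw [List.filter_eq_self.mpr]
  intro a ha
  simp
  exact hne a ha
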